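-- pv_equiv track=rewrite | github.com/Raushan102/PYTHON-DSA | easy/RestoreString.py | restoreString2
-- ===== SOURCE A (Python) =====
-- def restoreString2(s,address):
--  string=list(s)
--  i=0
--  while i < len(address):
--   if address[i] != i:
--    temp=address[i]
--    strTemp=string[i]
--    address[i]=address[temp]
--    string[i]=string[temp]
--    address[temp]=temp
--    string[temp]=strTemp
--   else:
--    i+=1
--  return "".join(string)
-- ===== SOURCE B (Python) =====
-- def restoreString2(s, address):
--     res = list(s)
--     for i, a in enumerate(address):
--         if a != i:  # fixed points need no move
--             res[a] = s[i]
--     return "".join(res)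
-- ===== Notes on version B (the rewrite author's own statement) =====
-- stated objective: simpler
-- what changed: Replaces the in-place cycle-following swap loop (which also mutates `address` to the identity) with a single forward scatter pass res[address[i]] = s[i] for the non-fixed indices into a fresh list; B does not mutate `address`.
import Mathlib
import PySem

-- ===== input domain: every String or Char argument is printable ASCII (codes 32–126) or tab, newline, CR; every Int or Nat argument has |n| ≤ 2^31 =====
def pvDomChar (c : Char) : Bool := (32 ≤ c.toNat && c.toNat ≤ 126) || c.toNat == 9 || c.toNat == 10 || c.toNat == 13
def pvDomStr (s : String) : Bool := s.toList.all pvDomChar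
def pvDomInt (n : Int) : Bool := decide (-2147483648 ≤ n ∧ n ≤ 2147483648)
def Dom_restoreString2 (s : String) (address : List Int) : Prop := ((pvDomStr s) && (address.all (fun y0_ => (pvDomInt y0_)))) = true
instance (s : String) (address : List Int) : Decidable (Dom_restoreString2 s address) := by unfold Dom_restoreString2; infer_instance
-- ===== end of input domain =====

-- B replaces A's in-place cycle-following swap loop by one scatter pass (over the non-fixed
-- indices) into a fresh list (objective: simpler). A also mutates `address` in place (to the
-- identity) — the equivalence proved here is about the RETURN value only; B leaves `address`
-- unchanged.

-- ===== PORT A =====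
-- A's while loop either increments i or performs a swap; on Pre_ inputs (address a permutation
-- of range(len(address))) each swap creates a new fixed point, so the loop runs at most
-- 2*len(address)+1 iterations: the fuel 2*len(address)+2 is never exhausted on Pre_ inputs.
-- Fuel exhaustion (returning the current string) happens only where the Python loops forever.
def loopA : Nat → List Char → List Int → Nat → List Char
  | 0, string, _, _ => string
  | fuel+1, string, address, i =>
    if i < address.length then
      let t := PySem.List.pyGetD address (i : Int) 0
      if t ≠ (i : Int) then
        let strTemp := PySem.List.pyGetD string (i : Int) ' '
        let address1 := PySem.List.pySetD address (i : Int) (PySem.List.pyGetD address t 0)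
        let string1 := PySem.List.pySetD string (i : Int) (PySem.List.pyGetD string t ' ')
        let address2 := PySem.List.pySetD address1 t t
        let string2 := PySem.List.pySetD string1 t strTemp
        loopA fuel string2 address2 i
      else
        loopA fuel string address (i+1)
    else string

def restoreString2 (s : String) (address : List Int) : String :=
  String.mk (loopA (2*address.length+2) s.toList address 0)

-- ===== PORT B =====
def restoreString2_alt (s : String) (address : List Int) : String :=
  String.mk ((PySem.List.enumerate address 0).foldl
    (fun res p =>
      if p.2 ≠ p.1 then PySem.List.pySetD res p.2 (PySem.List.pyGetD s.toList p.1 ' ')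
      else res)
    s.toList)

-- ===== PRECONDITION & SPEC =====
-- Pre_ = address is a permutation of range(len(address)) whose non-fixed indices all lie below
-- len(s): this is exactly the set of inputs on which A's loop terminates normally — outside it
-- A either raises IndexError (a swap reads string[j] for some j ≥ len(s), or address[t] for t
-- out of range) or loops forever (duplicate / negative entries keep address[i] != i for ever).
def Pre_restoreString2 (s : String) (address : List Int) : Prop :=
  address.Nodup ∧ (∀ x ∈ address, 0 ≤ x ∧ x < (address.length : Int)) ∧
    ∀ j < address.length, address.getD j 0 ≠ (j : Int) → j < s.toList.length
instance (s : String) (address : List Int) : Decidable (Pre_restoreString2 s address) := by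
  unfold Pre_restoreString2; infer_instance

def pvWitness_restoreString2 : String × List Int := ("ab", [1, 0, 2])

def Spec_restoreString2 (s : String) (address : List Int) (out : String) : Prop := out = restoreString2_alt s address
instance (s : String) (address : List Int) (out : String) : Decidable (Spec_restoreString2 s address out) := by unfold Spec_restoreString2; infer_instance

-- ===== CLAIM (what is proved, stated in full; the proofs are below) =====
def Claim_equal_restoreString2 : Prop := ∀ (s : String) (address : List Int), Dom_restoreString2 s address → Pre_restoreString2 s address → Spec_restoreString2 s address (restoreString2 s address)

-- ===== LEMMAS AND PROOFS =====

-- B's scatter pass, abstracted over the read source g0, accumulator r and pair list ps.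
def scatF (g0 : List Char) (r : List Char) (ps : List (Int × Int)) : List Char :=
  ps.foldl (fun res p =>
    if p.2 ≠ p.1 then PySem.List.pySetD res p.2 (PySem.List.pyGetD g0 p.1 ' ') else res) r

-- B's result on (g, a): scatter of g along the non-fixed pairs of enumerate a.
def scat (g : List Char) (a : List Int) : List Char :=
  scatF g g (PySem.List.enumerate a 0)

theorem alt_eq_scat (s : String) (address : List Int) :
    restoreString2_alt s address = String.mk (scat s.toList address) := rfl

theorem scatF_length (g0 r : List Char) (ps : List (Int × Int)) :
    (scatF g0 r ps).length = r.length := by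
  induction ps generalizing r with
  | nil => rfl
  | cons p ps ih =>
      simp only [scatF, List.foldl_cons] at *
      split
      · rw [ih, PySem.List.length_pySetD]
      · rw [ih]

theorem scatF_getElem?_miss (g0 r : List Char) (ps : List (Int × Int)) (k : Nat)
    (hpos : ∀ p ∈ ps, p.2 ≠ p.1 → 0 ≤ p.2) (hmiss : ∀ p ∈ ps, p.2 ≠ p.1 → p.2 ≠ (k : Int)) :
    (scatF g0 r ps)[k]? = r[k]? := by
  induction ps generalizing r with
  | nil => rfl
  | cons p ps ih =>
      simp only [scatF, List.foldl_cons] at *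
      rw [ih _ (fun q hq => hpos q (List.mem_cons_of_mem _ hq))
            (fun q hq => hmiss q (List.mem_cons_of_mem _ hq))]
      by_cases hc : p.2 = p.1
      · rw [if_neg (by simpa using hc)]
      · rw [if_pos hc]
        rw [PySem.List.pySetD_of_nonneg _ _ (hpos p (List.mem_cons_self ..) hc)]
        refine List.getElem?_set_ne ?_
        have h1 := hpos p (List.mem_cons_self ..) hc
        have h2 := hmiss p (List.mem_cons_self ..) hc
        omega

theorem scatF_getElem?_hit (g0 r : List Char) (ps1 ps2 : List (Int × Int)) (j : Int) (k : Nat)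
    (hk : k < r.length) (hjk : (k : Int) ≠ j)
    (hpos2 : ∀ p ∈ ps2, p.2 ≠ p.1 → 0 ≤ p.2)
    (hmiss2 : ∀ p ∈ ps2, p.2 ≠ p.1 → p.2 ≠ (k : Int)) :
    (scatF g0 r (ps1 ++ (j, (k : Int)) :: ps2))[k]? = some (PySem.List.pyGetD g0 j ' ') := by
  have h1 : scatF g0 r (ps1 ++ (j, (k : Int)) :: ps2)
      = scatF g0 (PySem.List.pySetD (scatF g0 r ps1) (k : Int) (PySem.List.pyGetD g0 j ' ')) ps2 := by
    simp only [scatF, List.foldl_append, List.foldl_cons, if_pos hjk]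
  rw [h1, scatF_getElem?_miss _ _ _ _ hpos2 hmiss2, PySem.List.pySetD_natCast]
  refine List.getElem?_set_self ?_
  rw [scatF_length]; exact hk

theorem scat_length (g : List Char) (a : List Int) : (scat g a).length = g.length :=
  scatF_length ..

theorem scat_getElem?_hit (g : List Char) (a : List Int) (j k : Nat)
    (hpos : ∀ x ∈ a, 0 ≤ x)
    (hj : j < a.length) (hk : k < g.length) (hja : a[j] = (k : Int)) (hnfj : a[j] ≠ (j : Int))
    (huni : ∀ j' (h : j' < a.length), a[j'] = (k : Int) → j' = j) :
    (scat g a)[k]? = some (PySem.List.pyGetD g (j : Int) ' ') := by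
  have hlen : j < (PySem.List.enumerate a 0).length := by
    rw [PySem.List.length_enumerate]; exact hj
  have hE : PySem.List.enumerate a 0 =
      (PySem.List.enumerate a 0).take j ++ ((j : Int), (k : Int)) :: (PySem.List.enumerate a 0).drop (j+1) := by
    conv_lhs => rw [← List.take_append_drop j (PySem.List.enumerate a 0)]
    rw [← List.getElem_cons_drop hlen, PySem.List.getElem_enumerate]
    rw [hja]; norm_num
  unfold scat
  rw [hE]
  refine scatF_getElem?_hit _ _ _ _ _ _ hk (by rw [← hja]; exact hnfj) ?_ ?_
  · intro p hp _
    have hp' : p ∈ PySem.List.enumerate a 0 := List.mem_of_mem_drop hp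
    obtain ⟨m, hm, rfl⟩ := (PySem.List.mem_enumerate_iff _ _ _).mp hp'
    exact hpos _ (List.getElem_mem hm)
  · intro p hp _
    obtain ⟨m, hm, hpe⟩ := List.mem_iff_getElem.mp hp
    have hm' : j + 1 + m < (PySem.List.enumerate a 0).length := by
      rw [List.length_drop] at hm; omega
    rw [List.getElem_drop, PySem.List.getElem_enumerate _ _ _ hm'] at hpe
    subst hpe
    intro hc
    have := huni (j+1+m) (by rw [PySem.List.length_enumerate] at hm'; exact hm') hc
    omega

theorem scat_getElem?_miss (g : List Char) (a : List Int) (k : Nat)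
    (hpos : ∀ x ∈ a, 0 ≤ x)
    (hnone : ∀ j (h : j < a.length), a[j] ≠ (j : Int) → a[j] ≠ (k : Int)) :
    (scat g a)[k]? = g[k]? := by
  refine scatF_getElem?_miss _ _ _ _ ?_ ?_
  · intro p hp _
    obtain ⟨m, hm, rfl⟩ := (PySem.List.mem_enumerate_iff _ _ _).mp hp
    exact hpos _ (List.getElem_mem hm)
  · intro p hp hnf
    obtain ⟨m, hm, rfl⟩ := (PySem.List.mem_enumerate_iff _ _ _).mp hp
    exact hnone m hm (by simpa using hnf)

-- injectivity of indexing a Nodup list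
theorem nodup_inj (a : List Int) (hnd : a.Nodup) (m1 m2 : Nat)
    (h1 : m1 < a.length) (h2 : m2 < a.length) (he : a[m1] = a[m2]) : m1 = m2 := by
  rw [List.nodup_iff_injective_get] at hnd
  have := hnd (a₁ := ⟨m1, h1⟩) (a₂ := ⟨m2, h2⟩) (by simpa using he)
  simpa using congrArg Fin.val this

theorem nodup_inj_getD (a : List Int) (hnd : a.Nodup) (m1 m2 : Nat)
    (h1 : m1 < a.length) (h2 : m2 < a.length) (he : a.getD m1 0 = a.getD m2 0) : m1 = m2 := by
  rw [List.getD_eq_getElem a 0 h1, List.getD_eq_getElem a 0 h2] at he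
  exact nodup_inj a hnd m1 m2 h1 h2 he

-- every k < len a has a preimage under a (a injects Fin n into [0,n), hence is onto)
theorem exists_preimage (a : List Int) (hb : ∀ x ∈ a, 0 ≤ x ∧ x < (a.length : Int))
    (hnd : a.Nodup) (k : Nat) (hk : k < a.length) :
    ∃ j, ∃ h : j < a.length, a[j] = (k : Int) := by
  have hbb : ∀ (m : Nat) (h : m < a.length), 0 ≤ a[m] ∧ a[m] < (a.length : Int) :=
    fun m h => hb _ (List.getElem_mem h)
  let f : Fin a.length → Fin a.length := fun j =>
    ⟨(a[j.1]'j.2).toNat, by have := hbb j.1 j.2; omega⟩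
  have hinj : Function.Injective f := by
    intro j1 j2 h
    have hv := congrArg Fin.val h
    simp only [f] at hv
    have e1 := hbb j1.1 j1.2
    have e2 := hbb j2.1 j2.2
    have : a[j1.1]'j1.2 = a[j2.1]'j2.2 := by omega
    exact Fin.ext (nodup_inj a hnd _ _ j1.2 j2.2 this)
  obtain ⟨j, hjf⟩ := Finite.injective_iff_surjective.mp hinj ⟨k, hk⟩
  refine ⟨j.1, j.2, ?_⟩
  have hv := congrArg Fin.val hjf
  simp only [f] at hv
  have := hbb j.1 j.2
  omega

-- entries of a after a swap step of A: the swapped list is a ∘ (transposition i tn)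
theorem swap_getD (a : List Int) (i tn : Nat) (hi : i < a.length) (htn : tn < a.length)
    (ht : a[i] = (tn : Int)) (m : Nat) :
    ((a.set i (a.getD tn 0)).set tn (tn : Int)).getD m 0
      = a.getD (if m = tn then i else if m = i then tn else m) 0 := by
  by_cases h1 : m = tn
  · rw [if_pos h1, List.getD_eq_getElem a 0 hi, h1,
      List.getD_eq_getElem _ 0 (by simpa using htn), List.getElem_set, if_pos rfl]
    exact ht.symm
  · by_cases h2 : m = i
    · rw [if_neg h1, if_pos h2, List.getD_eq_getElem a 0 htn, h2,
        List.getD_eq_getElem _ 0 (by simpa using hi), List.getElem_set,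
        if_neg (fun hc : tn = i => h1 (h2.trans hc.symm)), List.getElem_set, if_pos rfl]
    · rw [if_neg h1, if_neg h2]
      by_cases hm : m < a.length
      · rw [List.getD_eq_getElem a 0 hm, List.getD_eq_getElem _ 0 (by simpa using hm),
          List.getElem_set, if_neg (fun hc => h1 hc.symm), List.getElem_set,
          if_neg (fun hc => h2 hc.symm)]
      · rw [List.getD_eq_default _ 0 (by simpa using not_lt.mp hm),
          List.getD_eq_default _ 0 (not_lt.mp hm)]

-- the swapped list is still Nodup
theorem swap_nodup (a : List Int) (i tn : Nat) (hnd : a.Nodup)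
    (hi : i < a.length) (htn : tn < a.length) (ht : a[i] = (tn : Int)) :
    ((a.set i (a.getD tn 0)).set tn (tn : Int)).Nodup := by
  rw [List.nodup_iff_injective_get]
  intro j1 j2 he
  have hl1 : j1.1 < a.length := by simpa using j1.2
  have hl2 : j2.1 < a.length := by simpa using j2.2
  simp only [List.get_eq_getElem] at he
  rw [← List.getD_eq_getElem _ 0 j1.2, ← List.getD_eq_getElem _ 0 j2.2,
    swap_getD a i tn hi htn ht, swap_getD a i tn hi htn ht] at he
  have hs := nodup_inj_getD a hnd _ _
    (by split_ifs <;> first | exact hi | exact htn | exact hl1)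
    (by split_ifs <;> first | exact hi | exact htn | exact hl2) he
  apply Fin.ext
  split_ifs at hs <;> omega

-- bounds are preserved by the swap step
theorem swap_bounds (a : List Int) (i tn : Nat)
    (hb : ∀ x ∈ a, 0 ≤ x ∧ x < (a.length : Int)) (htn : tn < a.length) :
    ∀ x ∈ (a.set i (a.getD tn 0)).set tn (tn : Int),
      0 ≤ x ∧ x < (((a.set i (a.getD tn 0)).set tn (tn : Int)).length : Int) := by
  intro x hx
  have hlen : ((a.set i (a.getD tn 0)).set tn (tn : Int)).length = a.length := by simp
  rw [hlen]
  rcases List.mem_or_eq_of_mem_set hx with hx1 | rfl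
  · rcases List.mem_or_eq_of_mem_set hx1 with hx2 | rfl
    · exact hb x hx2
    · exact hb _ (by rw [List.getD_eq_getElem a 0 htn]; exact List.getElem_mem htn)
  · constructor <;> omega

-- the key invariant: a swap step of A does not change B's scatter result
theorem scat_swap (g : List Char) (a : List Int) (i tn : Nat)
    (hb : ∀ x ∈ a, 0 ≤ x ∧ x < (a.length : Int)) (hnd : a.Nodup)
    (hsupp : ∀ m (hm : m < a.length), a[m] ≠ (m : Int) → m < g.length)
    (hi : i < a.length) (htn : tn < a.length) (hitn : i ≠ tn)
    (ht : a[i] = (tn : Int)) :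
    scat ((g.set i (g.getD tn ' ')).set tn (g.getD i ' '))
         ((a.set i (a.getD tn 0)).set tn (tn : Int)) = scat g a := by
  set g2 := (g.set i (g.getD tn ' ')).set tn (g.getD i ' ') with hg2
  set a2 := (a.set i (a.getD tn 0)).set tn (tn : Int) with ha2
  have hla2 : a2.length = a.length := by simp [ha2]
  have hlg2 : g2.length = g.length := by simp [hg2]
  have hb2 := swap_bounds a i tn hb htn
  have hnd2 := swap_nodup a i tn hnd hi htn ht
  have hpos : ∀ x ∈ a, 0 ≤ x := fun x hx => (hb x hx).1
  have hpos2 : ∀ x ∈ a2, 0 ≤ x := fun x hx => (hb2 x hx).1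
  have hnfi : a[i] ≠ (i : Int) := by rw [ht]; intro hc; exact hitn (by exact_mod_cast hc.symm)
  have hnft : a[tn] ≠ (tn : Int) := by
    intro hc
    exact hitn (nodup_inj a hnd i tn hi htn (ht.trans hc.symm))
  have hig : i < g.length := hsupp i hi hnfi
  have htg : tn < g.length := hsupp tn htn hnft
  have hA2 : ∀ (m : Nat) (hm : m < a.length),
      a2[m]'(by omega) = a.getD (if m = tn then i else if m = i then tn else m) 0 := by
    intro m hm
    rw [← List.getD_eq_getElem a2 0 (by omega), ha2, swap_getD a i tn hi htn ht]
  have hG2 : ∀ (m : Nat) (hm : m < g.length),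
      g2[m]'(by omega) = if m = tn then g[i] else if m = i then g[tn] else g[m] := by
    intro m hm
    rw [← List.getD_eq_getElem g2 ' ' (by omega), hg2]
    by_cases h1 : m = tn
    · rw [if_pos h1, h1, List.getD_eq_getElem _ ' ' (by simpa using htg), List.getElem_set,
        if_pos rfl, List.getD_eq_getElem g ' ' hig]
    · by_cases h2 : m = i
      · rw [if_neg h1, if_pos h2, h2, List.getD_eq_getElem _ ' ' (by simpa using hig),
          List.getElem_set, if_neg (fun hc : tn = i => h1 (h2.trans hc.symm)),
          List.getElem_set, if_pos rfl, List.getD_eq_getElem g ' ' htg]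
      · rw [if_neg h1, if_neg h2, List.getD_eq_getElem _ ' ' (by simpa using hm),
          List.getElem_set, if_neg (fun hc => h1 hc.symm), List.getElem_set,
          if_neg (fun hc => h2 hc.symm)]
  -- σ sends a2-positions to a-positions: a2[m] = a[σ m]
  refine List.ext_getElem? fun k => ?_
  by_cases hkg : k < g.length
  · by_cases hex : ∃ j, ∃ hj : j < a.length, a[j] = (k : Int) ∧ a[j] ≠ (j : Int)
    · obtain ⟨j, hj, hja, hnfj⟩ := hex
      have huni : ∀ j' (h : j' < a.length), a[j'] = (k : Int) → j' = j :=
        fun j' h hj' => nodup_inj a hnd j' j h hj (by rw [hj', hja])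
      have hjg : j < g.length := hsupp j hj hnfj
      rw [scat_getElem?_hit g a j k hpos hj hkg hja hnfj huni]
      by_cases hji : j = i
      · -- j = i, so k = tn: position tn is a fixed point of a2, untouched by B's pass on a2
        have hktn : k = tn := by
          have hD : a.getD j 0 = (k : Int) := by
            rw [List.getD_eq_getElem a 0 hj]; exact hja
          rw [hji, List.getD_eq_getElem a 0 hi] at hD
          have h := hD.symm.trans ht
          exact_mod_cast h
        rw [scat_getElem?_miss g2 a2 k hpos2 ?_]
        · rw [List.getElem?_eq_getElem (show k < g2.length by omega),
            hG2 k hkg, if_pos hktn, PySem.List.pyGetD_natCast, hji,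
            List.getD_eq_getElem g ' ' hig]
        · intro m hm hnf hc
          have hm' : m < a.length := by omega
          rw [hA2 m hm'] at hnf hc
          have hσ : (if m = tn then i else if m = i then tn else m) < a.length := by
            split_ifs <;> first | exact hi | exact htn | exact hm'
          rw [List.getD_eq_getElem a 0 hσ] at hc
          have hmi := huni _ hσ hc
          split_ifs at hmi with w1 w2
          · -- m = tn: a2[tn] = tn, fixed, contradiction with hnf
            rw [List.getD_eq_getElem a 0 hσ, hc, w1, ← hktn] at hnf
            exact hnf rfl
          · omega
          · omega
      · by_cases hjt : j = tn
        · -- j = tn: in a2 the preimage of k moved to position i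
          have hja' : a[tn]'htn = (k : Int) := by
            have hD : a.getD j 0 = (k : Int) := by
              rw [List.getD_eq_getElem a 0 hj]; exact hja
            rw [hjt] at hD
            rw [← List.getD_eq_getElem a 0 htn]; exact hD
          by_cases hki : k = i
          · -- a2[i] = k = i is fixed: miss on a2, and g2[k] = g[tn]
            rw [scat_getElem?_miss g2 a2 k hpos2 ?_]
            · rw [List.getElem?_eq_getElem (show k < g2.length by omega),
                hG2 k hkg, if_neg (by omega), if_pos hki,
                PySem.List.pyGetD_natCast, hjt, List.getD_eq_getElem g ' ' htg]
            · intro m hm hnf hc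
              have hm' : m < a.length := by omega
              rw [hA2 m hm'] at hnf hc
              have hσ : (if m = tn then i else if m = i then tn else m) < a.length := by
                split_ifs <;> first | exact hi | exact htn | exact hm'
              rw [List.getD_eq_getElem a 0 hσ] at hc
              have hmi := huni _ hσ hc
              split_ifs at hmi with w1 w2
              · omega
              · -- m = i: a2[i] = a[tn] = k = i, fixed, contradiction
                rw [List.getD_eq_getElem a 0 hσ, hc, w2, ← hki] at hnf
                exact hnf rfl
              · omega
          · -- a2[i] = k ≠ i: hit at position i in a2
            rw [scat_getElem?_hit g2 a2 i k hpos2 (by omega) (by omega) ?_ ?_ ?_]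
            · rw [PySem.List.pyGetD_natCast, PySem.List.pyGetD_natCast, hjt,
                List.getD_eq_getElem g2 ' ' (by omega), List.getD_eq_getElem g ' ' htg,
                hG2 i hig, if_neg hitn, if_pos rfl]
            · rw [hA2 i hi, if_neg hitn, if_pos rfl, List.getD_eq_getElem a 0 htn]
              exact hja'
            · rw [hA2 i hi, if_neg hitn, if_pos rfl, List.getD_eq_getElem a 0 htn, hja']
              intro hc
              exact hki (by exact_mod_cast hc)
            · intro m hm hc
              have hm' : m < a.length := by omega
              rw [hA2 m hm'] at hc
              have hσ : (if m = tn then i else if m = i then tn else m) < a.length := by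
                split_ifs <;> first | exact hi | exact htn | exact hm'
              rw [List.getD_eq_getElem a 0 hσ] at hc
              have hmi := huni _ hσ hc
              split_ifs at hmi <;> omega
        · -- j ∉ {i, tn}: untouched position, hit at j in a2
          rw [scat_getElem?_hit g2 a2 j k hpos2 (by omega) (by omega) ?_ ?_ ?_]
          · rw [PySem.List.pyGetD_natCast, PySem.List.pyGetD_natCast,
              List.getD_eq_getElem g2 ' ' (by omega), List.getD_eq_getElem g ' ' hjg,
              hG2 j hjg, if_neg hjt, if_neg hji]
          · rw [hA2 j hj, if_neg hjt, if_neg hji, List.getD_eq_getElem a 0 hj]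
            exact hja
          · rw [hA2 j hj, if_neg hjt, if_neg hji, List.getD_eq_getElem a 0 hj]
            exact hnfj
          · intro m hm hc
            have hm' : m < a.length := by omega
            rw [hA2 m hm'] at hc
            have hσ : (if m = tn then i else if m = i then tn else m) < a.length := by
              split_ifs <;> first | exact hi | exact htn | exact hm'
            rw [List.getD_eq_getElem a 0 hσ] at hc
            have hmi := huni _ hσ hc
            split_ifs at hmi <;> omega
    · -- k has no non-fixed preimage in a: both passes leave position k at its g-value
      have hfixK : ∀ j (hj : j < a.length), a[j] = (k : Int) → a[j] = (j : Int) := by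
        intro j hj hc
        by_contra hnf
        exact hex ⟨j, hj, hc, hnf⟩
      have hki : k ≠ i := by
        intro hc
        obtain ⟨j0, hj0, hja0⟩ := exists_preimage a hb hnd k (hc ▸ hi)
        have h2 := hfixK j0 hj0 hja0
        have hcast := h2.symm.trans hja0
        have hj0i : j0 = i := by omega
        have hD : a.getD j0 0 = (j0 : Int) := by
          rw [List.getD_eq_getElem a 0 hj0]; exact h2
        rw [hj0i] at hD
        exact hnfi (by rw [← List.getD_eq_getElem a 0 hi]; exact_mod_cast hD)
      have hkt : k ≠ tn := by
        intro hc
        exact hnfi (hfixK i hi (by rw [ht, hc]))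
      rw [scat_getElem?_miss g a k hpos (fun m hm hnf hc => hnf (hfixK m hm hc)),
        scat_getElem?_miss g2 a2 k hpos2 ?_]
      · rw [List.getElem?_eq_getElem hkg, List.getElem?_eq_getElem (show k < g2.length by omega),
          hG2 k hkg, if_neg hkt, if_neg hki]
      · intro m hm hnf hc
        have hm' : m < a.length := by omega
        rw [hA2 m hm'] at hnf hc
        by_cases w1 : m = tn
        · rw [if_pos w1, List.getD_eq_getElem a 0 hi, ht, w1] at hnf
          exact hnf rfl
        · by_cases w2 : m = i
          · rw [if_neg w1, if_pos w2, List.getD_eq_getElem a 0 htn] at hc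
            exact hnft (hfixK tn htn hc)
          · rw [if_neg w1, if_neg w2, List.getD_eq_getElem a 0 hm'] at hnf hc
            exact hnf (hfixK m hm' hc)
  · rw [List.getElem?_eq_none (by rw [scat_length]; omega),
      List.getElem?_eq_none (by rw [scat_length]; omega)]

-- when the permutation is the identity (everywhere fixed), the scatter is the identity
theorem scat_id (g : List Char) (a : List Int)
    (hfix : ∀ j (h : j < a.length), a[j] = (j : Int)) :
    scat g a = g := by
  refine List.ext_getElem? fun k => ?_
  by_cases hkg : k < g.length
  · rw [scat_getElem?_miss g a k (fun x hx => ?_) (fun j h hnf => absurd (hfix j h) hnf)]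
    obtain ⟨m, hm, rfl⟩ := List.mem_iff_getElem.mp hx
    rw [hfix m hm]; omega
  · rw [List.getElem?_eq_none (l := scat g a) (by rw [scat_length]; omega),
      List.getElem?_eq_none (by omega)]

-- number of non-fixed points of a, the decreasing measure of A's loop
def unfx (a : List Int) : Nat :=
  ((Finset.range a.length).filter (fun j => a.getD j 0 ≠ (j : Int))).card

theorem unfx_le (a : List Int) : unfx a ≤ a.length := by
  calc ((Finset.range a.length).filter (fun j => a.getD j 0 ≠ (j : Int))).card
      ≤ (Finset.range a.length).card := Finset.card_filter_le _ _
    _ = a.length := Finset.card_range _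

theorem unfx_swap_lt (a : List Int) (i tn : Nat) (hnd : a.Nodup)
    (hi : i < a.length) (htn : tn < a.length) (hitn : i ≠ tn) (ht : a[i] = (tn : Int)) :
    unfx ((a.set i (a.getD tn 0)).set tn (tn : Int)) < unfx a := by
  set a2 := (a.set i (a.getD tn 0)).set tn (tn : Int) with ha2
  have hla2 : a2.length = a.length := by simp [ha2]
  have hatn : a[tn] ≠ (tn : Int) := by
    intro hc
    exact hitn (nodup_inj a hnd i tn hi htn (ht.trans hc.symm))
  have hsub : (Finset.range a2.length).filter (fun j => a2.getD j 0 ≠ (j : Int))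
      ⊆ (Finset.range a.length).filter (fun j => a.getD j 0 ≠ (j : Int)) := by
    intro j hj
    rw [Finset.mem_filter, Finset.mem_range] at hj ⊢
    obtain ⟨hjr, hpred⟩ := hj
    rw [ha2, swap_getD a i tn hi htn ht] at hpred
    refine ⟨by omega, ?_⟩
    by_cases h1 : j = tn
    · exfalso
      apply hpred
      rw [if_pos h1, List.getD_eq_getElem a 0 hi, ht, h1]
    · by_cases h2 : j = i
      · rw [h2, List.getD_eq_getElem a 0 hi, ht]
        intro hc; have : tn = i := by exact_mod_cast hc
        omega
      · rw [if_neg h1, if_neg h2] at hpred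
        exact hpred
  have htn1 : tn ∈ (Finset.range a.length).filter (fun j => a.getD j 0 ≠ (j : Int)) := by
    rw [Finset.mem_filter, Finset.mem_range]
    exact ⟨htn, by rw [List.getD_eq_getElem a 0 htn]; exact hatn⟩
  have htn2 : tn ∉ (Finset.range a2.length).filter (fun j => a2.getD j 0 ≠ (j : Int)) := by
    rw [Finset.mem_filter]
    rintro ⟨-, hpred⟩
    apply hpred
    rw [ha2, swap_getD a i tn hi htn ht, if_pos rfl, List.getD_eq_getElem a 0 hi, ht]
  unfold unfx
  exact Finset.card_lt_card (Finset.ssubset_def.mpr ⟨hsub, fun h => htn2 (h htn1)⟩)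

theorem loopA_eq (fuel : Nat) (g : List Char) (a : List Int) (i : Nat)
    (hb : ∀ x ∈ a, 0 ≤ x ∧ x < (a.length : Int)) (hnd : a.Nodup)
    (hsupp : ∀ m (hm : m < a.length), a[m] ≠ (m : Int) → m < g.length)
    (hfix : ∀ j (h : j < a.length), j < i → a[j] = (j : Int))
    (hfuel : unfx a + (a.length - i) < fuel) :
    loopA fuel g a i = scat g a := by
  induction fuel generalizing g a i with
  | zero => omega
  | succ fuel ih =>
    simp only [loopA]
    by_cases hia : i < a.length
    · rw [if_pos hia]
      have hbi := hb _ (List.getElem_mem hia)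
      by_cases hti : a[i] = (i : Int)
      · -- a[i] == i: step to i+1
        have hgi : PySem.List.pyGetD a (i : Int) 0 = (i : Int) := by
          rw [PySem.List.pyGetD_natCast, List.getD_eq_getElem a 0 hia, hti]
        rw [hgi, if_neg (by simp)]
        exact ih g a (i+1) hb hnd hsupp
          (fun j h hj => by rcases Nat.lt_succ_iff_lt_or_eq.mp hj with h' | rfl
                            exacts [hfix j h h', hti])
          (by omega)
      · -- a[i] != i: swap step
        set tn := (a[i]'hia).toNat with htn_def
        have ht : a[i]'hia = (tn : Int) := by omega
        have htn : tn < a.length := by omega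
        have hitn : i ≠ tn := fun hc => hti (by rw [ht, hc])
        have hnft : a[tn] ≠ (tn : Int) := by
          intro hc
          exact hitn (nodup_inj a hnd i tn hia htn (ht.trans hc.symm))
        have hig : i < g.length := hsupp i hia hti
        have htg : tn < g.length := hsupp tn htn hnft
        have hgi : PySem.List.pyGetD a (i : Int) 0 = (tn : Int) := by
          rw [PySem.List.pyGetD_natCast, List.getD_eq_getElem a 0 hia, ht]
        rw [hgi, if_pos (by intro hc; exact hti (by rw [ht, hc]))]
        simp only [PySem.List.pySetD_natCast, PySem.List.pyGetD_natCast]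
        rw [ih _ _ i (swap_bounds a i tn hb htn)
              (swap_nodup a i tn hnd hia htn ht)
              (fun m hm hnf => ?_)
              (fun j h hj => ?_)
              (by have h1 := unfx_swap_lt a i tn hnd hia htn hitn ht
                  have h2 : ((a.set i (a.getD tn 0)).set tn (tn : Int)).length = a.length := by
                    simp
                  omega)]
        · exact scat_swap g a i tn hb hnd hsupp hia htn hitn ht
        · -- support of the swapped list is within the (length-preserved) string
          have hm' : m < a.length := by simpa using hm
          have hlg : ((g.set i (g.getD tn ' ')).set tn (g.getD i ' ')).length = g.length := by
            simp
          rw [hlg]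
          rw [← List.getD_eq_getElem _ 0 hm, swap_getD a i tn hia htn ht] at hnf
          by_cases w1 : m = tn
          · exfalso
            apply hnf
            rw [if_pos w1, List.getD_eq_getElem a 0 hia, ht, w1]
          · by_cases w2 : m = i
            · omega
            · rw [if_neg w1, if_neg w2, List.getD_eq_getElem a 0 hm'] at hnf
              exact hsupp m hm' hnf
        · -- positions below i are untouched by the swap (i < tn since a is id below i)
          have hitn' : i < tn := by
            rcases Nat.lt_or_ge i tn with h' | h'
            · exact h'
            · have h'' : tn < i := by omega
              exact absurd (nodup_inj a hnd i tn hia htn (ht.trans (hfix tn htn h'').symm)) hitn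
          have h' : j < a.length := by simpa using h
          rw [← List.getD_eq_getElem _ 0 h, swap_getD a i tn hia htn ht,
            if_neg (by omega), if_neg (by omega), List.getD_eq_getElem a 0 h']
          exact hfix j h' hj
    · rw [if_neg hia]
      exact (scat_id g a (fun j h => hfix j h (by omega))).symm

-- ===== VERDICT (by name: the statement is the Claim_ definition above) =====
theorem restoreString2_spec : Claim_equal_restoreString2 := by
  intro s address _hdom hpre
  obtain ⟨hnd, hb, hsupp⟩ := hpre
  unfold Spec_restoreString2
  rw [alt_eq_scat]
  unfold restoreString2
  refine congrArg String.mk (loopA_eq _ _ _ 0 hb hnd (fun m hm hnf => ?_) (fun j h hj => by omega)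
    (by have := unfx_le address; omega))
  exact hsupp m hm (by rw [List.getD_eq_getElem address 0 hm]; exact hnf)
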